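-- pv_equiv track=rewrite | github.com/weim1643/CCC | 2017/junior_data/j4/solution.py | solution
-- ===== SOURCE A (Python) =====
-- def solution(number):
--     a = int(number[0]) // 720 * 31
--     b = int(number[0]) % 720
--     out = 0
--     hour = 12
--     minute = 0
--
--     for i in range(b):
--         minute += 1
--         if minute == 60:
--             minute = 0
--             if hour == 12:
--                 hour = 1
--             else:
--                 hour += 1
--         l = list(str(hour))
--         if minute < 10:
--             l.append("0")
--             l.append(str(minute))
--         else:
--             l.append(str(minute)[0])
--             l.append(str(minute)[1])
--
--         dif = 10
--         s = True
--         for j in range(len(l)):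
--             if dif == 10:
--                 dif = int(l[j]) - int(l[j +1])
--             elif j != len(l) - 1:
--                 if dif != int(l[j]) - int(l[j + 1]):
--                     s = False
--         if s == True:
--             out += 1
--             s = False
--
--
--     return str(out + a)
-- ===== SOURCE B (Python) =====
-- def _is_arith(t):
--     h, m = divmod(t, 60)
--     hour = 12 if h % 12 == 0 else h % 12
--     d = ([1, hour - 10] if hour >= 10 else [hour]) + [m // 10, m % 10]
--     return len({d[i] - d[i + 1] for i in range(len(d) - 1)}) == 1
--
-- _POS = [t for t in range(1, 721) if _is_arith(t)]
--
-- def solution(number):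
--     n = int(number[0])
--     return str(n // 720 * 31 + len([p for p in _POS if p <= n % 720]))
-- ===== Notes on version B (the rewrite author's own statement) =====
-- stated objective: faster
-- what changed: B precomputes once the 31 elapsed-minute positions within a 12-hour cycle whose clock digits form an arithmetic progression (via divmod, not incremental hour/minute mutation) and answers each query as n//720*31 plus a count of precomputed positions <= n%720, instead of re-simulating the clock minute by minute per call.
import Mathlib
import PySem

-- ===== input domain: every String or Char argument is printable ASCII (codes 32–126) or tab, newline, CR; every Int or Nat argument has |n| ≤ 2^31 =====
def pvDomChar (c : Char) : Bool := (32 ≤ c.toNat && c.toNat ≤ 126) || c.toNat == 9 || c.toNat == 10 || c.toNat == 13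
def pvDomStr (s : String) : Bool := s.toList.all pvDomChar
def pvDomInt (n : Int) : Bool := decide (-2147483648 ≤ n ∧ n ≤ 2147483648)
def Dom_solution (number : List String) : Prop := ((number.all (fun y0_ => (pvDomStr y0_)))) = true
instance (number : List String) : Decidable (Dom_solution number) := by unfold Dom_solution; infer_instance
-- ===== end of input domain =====

-- B replaces A's per-call minute-by-minute clock simulation by a once-precomputed
-- table of the 31 arithmetic-digit positions per 12-hour cycle, answered by a count.

-- ===== PORT A =====

-- one iteration of A's "for i in range(b)" loop; state = (out, hour, minute)
def solAStep (st : Int × Int × Int) : Int × Int × Int :=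
  let out := st.1
  let minute0 := st.2.2 + 1
  let hm : Int × Int :=
    if minute0 == 60 then (if st.2.1 == 12 then (1, 0) else (st.2.1 + 1, 0))
    else (st.2.1, minute0)
  let hour := hm.1
  let minute := hm.2
  -- l = list(str(hour)) then the two minute digits appended
  let l : List String :=
    (PySem.Int.toStr hour).toList.map (fun c => String.mk [c]) ++
    (if minute < 10 then ["0", PySem.Int.toStr minute]
     else [String.mk [((PySem.Int.toStr minute).toList.getD 0 ' ')],
           String.mk [((PySem.Int.toStr minute).toList.getD 1 ' ')]])
  let digAt (j : Nat) : Int := (PySem.Int.ofStr? (l.getD j "")).getD 0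
  let ds : Int × Bool :=
    (List.range l.length).foldl (fun (p : Int × Bool) j =>
      if p.1 == 10 then (digAt j - digAt (j + 1), p.2)
      else if j != l.length - 1 then
        (if p.1 != digAt j - digAt (j + 1) then (p.1, false) else p)
      else p) (10, true)
  if ds.2 then (out + 1, hour, minute) else (out, hour, minute)

def solution (number : List String) : String :=
  match PySem.List.pyGet? number 0 with
  | none => ""          -- IndexError: excluded by Pre_solution
  | some s =>
    match PySem.Int.ofStr? s with
    | none => ""        -- ValueError: excluded by Pre_solution
    | some n =>
      let a := PySem.Int.floordiv n 720 * 31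
      let b := PySem.Int.mod n 720
      let st := (PySem.List.pyRange 0 b 1).foldl (fun st _ => solAStep st) (0, 12, 0)
      PySem.Int.toStr (st.1 + a)

-- ===== PORT B =====

def pvIsArith (t : Int) : Bool :=
  let h := PySem.Int.floordiv t 60
  let m := PySem.Int.mod t 60
  let hour : Int := if PySem.Int.mod h 12 == 0 then 12 else PySem.Int.mod h 12
  let d : List Int :=
    (if hour ≥ 10 then [1, hour - 10] else [hour]) ++ [PySem.Int.floordiv m 10, PySem.Int.mod m 10]
  let diffs : PySem.Set Int :=
    PySem.Set.ofList ((List.range (d.length - 1)).map (fun i => d.getD i 0 - d.getD (i + 1) 0))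
  diffs.length == 1

def pvPOS : List Int := (PySem.List.pyRange 1 721 1).filter pvIsArith

def solution_alt (number : List String) : String :=
  match PySem.List.pyGet? number 0 with
  | none => ""
  | some s =>
    match PySem.Int.ofStr? s with
    | none => ""
    | some n =>
      PySem.Int.toStr (PySem.Int.floordiv n 720 * 31 +
        ((pvPOS.filter (fun p => p ≤ PySem.Int.mod n 720)).length : Int))

-- ===== PRECONDITION & SPEC =====
-- Pre_ excludes exactly the inputs where A raises: an empty list (IndexError) or a
-- first element that int() rejects (ValueError).
def Pre_solution (number : List String) : Prop :=
  number ≠ [] ∧ (PySem.Int.ofStr? (number.headD "")).isSome = true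
instance (number : List String) : Decidable (Pre_solution number) := by
  unfold Pre_solution; infer_instance

def pvWitness_solution : List String := ["34"]

def Spec_solution (number : List String) (out : String) : Prop := out = solution_alt number
instance (number : List String) (out : String) : Decidable (Spec_solution number out) := by
  unfold Spec_solution; infer_instance

-- ===== CLAIM (what is proved, stated in full; the proofs are below) =====
def Claim_equal_solution : Prop :=
  ∀ (number : List String), Dom_solution number → Pre_solution number →
    Spec_solution number (solution number)

-- ===== LEMMAS AND PROOFS =====

def cntA (b : Int) : Int :=
  ((PySem.List.pyRange 0 b 1).foldl (fun st _ => solAStep st) ((0 : Int), (12 : Int), (0 : Int))).1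

def cntB (b : Int) : Int := ((pvPOS.filter (fun p => p ≤ b)).length : Int)

-- closed form for the (hour, minute) component of A's loop state after k steps
def hmState (k : Nat) : Int × Int :=
  (if k / 60 % 12 = 0 then (12 : Int) else ((k / 60 % 12 : Nat) : Int), ((k % 60 : Nat) : Int))

-- A's step adds its 0/1 qualification to `out` and updates (hour, minute) independently of `out`
theorem ite_out_pair {c : Prop} [Decidable c] (o : Int) (p : Int × Int) :
    (if c then (o + 1, p) else (o, p))
      = (o + (if c then ((0 : Int) + 1, p) else ((0 : Int), p)).1,
         (if c then ((0 : Int) + 1, p) else ((0 : Int), p)).2) := by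
  split <;> simp

theorem solAStep_split (o : Int) (p : Int × Int) :
    solAStep (o, p) = (o + (solAStep (0, p)).1, (solAStep (0, p)).2) := by
  simp only [solAStep]
  exact ite_out_pair _ _

-- the (hour, minute) component of A's step is the plain clock update
theorem solAStep_snd (o : Int) (p : Int × Int) :
    (solAStep (o, p)).2
      = (if p.2 + 1 == 60 then (if p.1 == 12 then ((1 : Int), (0 : Int)) else (p.1 + 1, 0))
         else (p.1, p.2 + 1)) := by
  simp only [solAStep]
  repeat' split
  all_goals rfl


theorem hm_step (k : Nat) : (solAStep (0, hmState k)).2 = hmState (k + 1) := by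
  rw [solAStep_snd]
  unfold hmState
  simp only [beq_iff_eq]
  have hlt : k / 60 % 12 < 12 := Nat.mod_lt _ (by norm_num)
  by_cases h59 : k % 60 = 59
  · rw [h59, show (k + 1) % 60 = 0 from by omega]
    by_cases h0 : k / 60 % 12 = 0
    · rw [h0, show (k + 1) / 60 % 12 = 1 from by omega]
      norm_num
    · by_cases h11 : k / 60 % 12 = 11
      · rw [h11, show (k + 1) / 60 % 12 = 0 from by omega]
        norm_num
      · rw [show (k + 1) / 60 % 12 = k / 60 % 12 + 1 from by omega]
        have hne12 : ((k / 60 % 12 : Nat) : Int) ≠ 12 := by omega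
        rw [if_neg h0, if_neg hne12, if_pos (by norm_num : ((59 : Nat) : Int) + 1 = 60),
            if_neg (by omega : ¬ (k / 60 % 12 + 1 = 0))]
        rw [Prod.mk.injEq]
        constructor
        · push_cast; ring
        · norm_num
  · rw [show (k + 1) % 60 = k % 60 + 1 from by omega,
        show (k + 1) / 60 % 12 = k / 60 % 12 from by omega]
    rw [if_neg (by omega : ¬ (((k % 60 : Nat) : Int) + 1 = 60))]
    rw [Prod.mk.injEq]
    constructor
    · rfl
    · push_cast; ring

set_option maxHeartbeats 12000000 in
set_option maxRecDepth 100000 in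
theorem keyD : ((List.range 720).all (fun k =>
    (solAStep (0, hmState k)).1 == (if pvIsArith ((k : Int) + 1) then 1 else 0))) = true := by decide

theorem cntB_zero : cntB 0 = 0 := by
  unfold cntB
  have h : pvPOS.filter (fun p => p ≤ (0 : Int)) = [] := by
    rw [List.filter_eq_nil_iff]
    intro a ha
    unfold pvPOS at ha
    have := PySem.List.mem_pyRange_one.mp (List.mem_of_mem_filter ha)
    simp only [decide_eq_true_eq]
    omega
  rw [h]
  rfl

theorem filter_le_succ (xs : List Int) (k : Int) :
    (xs.filter (fun p => p ≤ k + 1)).length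
      = (xs.filter (fun p => p ≤ k)).length + xs.count (k + 1) := by
  induction xs with
  | nil => simp
  | cons x xs ih =>
    simp only [List.filter_cons, List.count_cons]
    by_cases h1 : x ≤ k + 1 <;> by_cases h2 : x ≤ k <;> by_cases h3 : x = k + 1 <;>
      simp [h1, h2, h3, ih] <;> omega

theorem count_pvPOS (t : Int) (h1 : 1 ≤ t) (h2 : t ≤ 720) :
    pvPOS.count t = if pvIsArith t then 1 else 0 := by
  unfold pvPOS
  by_cases h : pvIsArith t
  · rw [List.count_filter h, if_pos h]
    exact List.count_eq_one_of_mem (PySem.List.nodup_pyRange_one 1 721)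
      (PySem.List.mem_pyRange_one.mpr ⟨h1, by omega⟩)
  · rw [if_neg h]
    refine List.count_eq_zero_of_not_mem ?_
    intro hmem
    exact h (List.of_mem_filter hmem)

theorem cntB_succ (k : Nat) (hk : k < 720) :
    cntB ((k : Int) + 1) = cntB (k : Int) + (if pvIsArith ((k : Int) + 1) then 1 else 0) := by
  unfold cntB
  rw [filter_le_succ pvPOS (k : Int), count_pvPOS ((k : Int) + 1) (by omega) (by omega)]
  split <;> push_cast <;> ring

theorem main_inv (k : Nat) (hk : k ≤ 720) :
    (PySem.List.pyRange 0 (k : Int) 1).foldl (fun st _ => solAStep st)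
        ((0 : Int), (12 : Int), (0 : Int))
      = (cntB (k : Int), hmState k) := by
  induction k with
  | zero =>
    rw [show ((0 : Nat) : Int) = 0 from rfl, PySem.List.pyRange_zero]
    rw [show (0 : Int).toNat = 0 from rfl]
    simp only [List.range_zero, List.map_nil, List.foldl_nil]
    rw [cntB_zero]
    rfl
  | succ k ih =>
    have hk' : k < 720 := by omega
    have ih' := ih (by omega)
    have hcast : ((k + 1 : Nat) : Int) = (k : Int) + 1 := by push_cast; ring
    rw [hcast, PySem.List.pyRange_one_succ_right (by positivity), List.foldl_append, ih']
    simp only [List.foldl_cons, List.foldl_nil]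
    have hhm : (solAStep (0, hmState k)).2 = hmState (k + 1) := hm_step k
    have hd : (solAStep (0, hmState k)).1 = (if pvIsArith ((k : Int) + 1) then 1 else 0) :=
      eq_of_beq (List.all_eq_true.mp keyD _ (List.mem_range.mpr hk'))
    rw [solAStep_split, hhm, hd, cntB_succ k hk']

theorem cnt_eq (b : Int) (h0 : 0 ≤ b) (h1 : b < 720) : cntA b = cntB b := by
  have hb : b = ((b.toNat : Nat) : Int) := by omega
  rw [hb]
  unfold cntA
  rw [main_inv b.toNat (by omega)]

-- ===== VERDICT (by name: the statement is the Claim_ definition above) =====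
theorem solution_spec : Claim_equal_solution := by
  intro number _ hpre
  obtain ⟨hne, hsome⟩ := hpre
  obtain ⟨s, rest, rfl⟩ : ∃ s rest, number = s :: rest := by
    cases number with
    | nil => exact absurd rfl hne
    | cons a l => exact ⟨a, l, rfl⟩
  simp only [List.headD] at hsome
  obtain ⟨n, hn⟩ := Option.isSome_iff_exists.mp hsome
  unfold Spec_solution solution solution_alt
  rw [PySem.List.pyGet?_zero_cons]
  simp only [hn]
  have hmod0 : 0 ≤ PySem.Int.mod n 720 := PySem.Int.mod_nonneg n (by norm_num)
  have hmod1 : PySem.Int.mod n 720 < 720 := PySem.Int.mod_lt n (by norm_num)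
  have := cnt_eq (PySem.Int.mod n 720) hmod0 hmod1
  unfold cntA cntB at this
  rw [this]
  ring_nf
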